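-- pv_equiv track=rewrite | github.com/Aasthaengg/IBMdataset | Python_codes/p03488/s691663031.py | f
-- ===== SOURCE A (Python) =====
-- def f(l):
--     if len(l) == 0:
--         return [0]
--     post = [l[0]]
--     for i in range(1, len(l)):
--         if l[i]:
--             pre = sorted(post)
--             post = []
--             for j in range(len(pre)):
--                 if j == 0 or pre[j] != pre[j-1]:
--                     post.append(pre[j]+l[i])
--                     post.append(pre[j]-l[i])
--     return post
-- ===== SOURCE B (Python) =====
-- def f(l):
--     # Subset-sum formulation: a value reachable before the last move equals
--     # base - s where s ranges over the doubled subset sums of the earlier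
--     # nonzero moves; one descending sort of those sums yields the output order.
--     if len(l) == 0:
--         return [0]
--     x0 = l[0]
--     moves = [d for d in l[1:] if d]
--     if not moves:
--         return [x0]
--     *init, last = moves
--     sums = {0}
--     for d in init:
--         sums = sums | {s + 2 * d for s in sums}
--     base = x0 + sum(init)
--     out = []
--     for s in sorted(sums, reverse=True):
--         out.append(base - s + last)
--         out.append(base - s - last)
--     return out
-- ===== Notes on version B (the rewrite author's own statement) =====
-- stated objective: faster
-- what changed: B replaces A's per-step sort/adjacent-dedup/plus-minus expansion by a subset-sum formulation: every reachable value before the last move is base - s for a doubled subset sum s of the earlier nonzero moves, so B runs an addition-only subset-sum DP over a set and does a single descending sort at the end to emit the final +/- pairs.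
import Mathlib
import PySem

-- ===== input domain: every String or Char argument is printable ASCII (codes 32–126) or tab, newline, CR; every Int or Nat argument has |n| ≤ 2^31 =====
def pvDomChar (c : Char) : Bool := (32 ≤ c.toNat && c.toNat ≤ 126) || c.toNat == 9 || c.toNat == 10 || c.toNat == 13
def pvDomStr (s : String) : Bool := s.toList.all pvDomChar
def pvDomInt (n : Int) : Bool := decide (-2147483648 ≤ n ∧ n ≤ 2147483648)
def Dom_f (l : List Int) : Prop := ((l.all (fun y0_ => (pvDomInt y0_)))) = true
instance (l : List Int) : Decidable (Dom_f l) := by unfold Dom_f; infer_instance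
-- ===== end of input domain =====

-- B replaces A's per-step sort/dedup/± expansion by an addition-only subset-sum
-- DP (reachable value = base - doubled subset sum) with one final descending
-- sort (objective: faster, asymptotic).

-- ===== PORT A =====
def f (l : List Int) : List Int :=
  if PySem.List.len l == 0 then [0]
  else
    (PySem.List.pyRange 1 (PySem.List.len l)).foldl
      (fun post i =>
        if PySem.List.pyGetD l i 0 ≠ 0 then
          let pre := PySem.List.sorted post (fun x => x)
          (PySem.List.pyRange 0 (PySem.List.len pre)).foldl
            (fun post2 j =>
              if j = 0 ∨ PySem.List.pyGetD pre j 0 ≠ PySem.List.pyGetD pre (j - 1) 0 then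
                (post2 ++ [PySem.List.pyGetD pre j 0 + PySem.List.pyGetD l i 0])
                  ++ [PySem.List.pyGetD pre j 0 - PySem.List.pyGetD l i 0]
              else post2)
            []
        else post)
      [PySem.List.pyGetD l 0 0]

-- ===== PORT B =====
/-- `moves[-1]` of a nonempty list (hand port of the `*init, last = moves` unpacking; exact for nonempty lists, 0 only as the unused default). -/
def pvLast : List Int → Int
  | [] => 0
  | [a] => a
  | _ :: b :: t => pvLast (b :: t)

def f_alt (l : List Int) : List Int :=
  if PySem.List.len l == 0 then [0]
  else
    let x0 := PySem.List.pyGetD l 0 0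
    let moves := (PySem.List.slice l (some 1) none).filter (fun d => decide (d ≠ 0))
    if moves = [] then [x0]
    else
      let init := moves.dropLast
      let last := pvLast moves
      let sums := init.foldl
        (fun s d => PySem.Set.union s (PySem.Set.ofList (s.map (fun t => t + 2 * d))))
        (PySem.Set.ofList [(0 : Int)])
      let base := x0 + init.sum
      (PySem.List.sorted sums (fun x => x) true).foldl
        (fun out s => (out ++ [base - s + last]) ++ [base - s - last]) []

-- ===== PRECONDITION & SPEC =====
def Spec_f (l : List Int) (out : List Int) : Prop := out = f_alt l
instance (l : List Int) (out : List Int) : Decidable (Spec_f l out) := by unfold Spec_f; infer_instance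

-- ===== CLAIM (what is proved, stated in full; the proofs are below) =====
def Claim_equal_f : Prop := ∀ (l : List Int), Dom_f l → Spec_f l (f l)

-- ===== LEMMAS AND PROOFS =====

/-- `[v + d, v - d]`, the pair of values appended for a kept value `v`. -/
def pvPair (d v : Int) : List Int := [v + d, v - d]

/-- Adjacent dedup of a list after a leading sentinel `p`. -/
def pvChain (p : Int) : List Int → List Int
  | [] => []
  | y :: ys => if y = p then pvChain y ys else y :: pvChain y ys

/-- Adjacent dedup (what A's `j == 0 or pre[j] != pre[j-1]` keeps). -/
def pvDedup : List Int → List Int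
  | [] => []
  | x :: xs => x :: pvChain x xs

theorem pvChain_subset {a p : Int} {xs : List Int} (h : a ∈ pvChain p xs) : a ∈ xs := by
  induction xs generalizing p with
  | nil => simpa [pvChain] using h
  | cons y ys ih =>
    simp only [pvChain] at h
    by_cases hyp : y = p
    · rw [if_pos hyp] at h
      exact List.mem_cons_of_mem _ (ih h)
    · rw [if_neg hyp] at h
      rcases List.mem_cons.mp h with h | h
      · simp [h]
      · exact List.mem_cons_of_mem _ (ih h)

theorem pvChain_mem_iff (a p : Int) (xs : List Int) :
    (a ∈ pvChain p xs ∨ a = p) ↔ (a ∈ xs ∨ a = p) := by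
  induction xs generalizing p with
  | nil => simp [pvChain]
  | cons y ys ih =>
    have hiy := ih y
    by_cases hyp : y = p
    · subst hyp
      simp only [pvChain, List.mem_cons]
      tauto
    · simp only [pvChain, if_neg hyp, List.mem_cons]
      tauto

theorem pvDedup_mem_iff (a : Int) (xs : List Int) : a ∈ pvDedup xs ↔ a ∈ xs := by
  cases xs with
  | nil => simp [pvDedup]
  | cons x t =>
    have h := pvChain_mem_iff a x t
    simp only [pvDedup, List.mem_cons]
    tauto

theorem pvChain_pairwise (p : Int) (xs : List Int)
    (h : (p :: xs).Pairwise (· ≤ ·)) : (p :: pvChain p xs).Pairwise (· < ·) := by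
  induction xs generalizing p with
  | nil => simp [pvChain]
  | cons y ys ih =>
    rcases List.pairwise_cons.mp h with ⟨hple, htail⟩
    by_cases hyp : y = p
    · subst hyp
      simp only [pvChain]
      exact ih y htail
    · have hpy : p < y := lt_of_le_of_ne (hple y (by simp)) (Ne.symm hyp)
      simp only [pvChain, if_neg hyp]
      refine List.pairwise_cons.mpr ⟨?_, ih y htail⟩
      rintro z hz
      rcases List.mem_cons.mp hz with rfl | hz'
      · exact hpy
      · have hzys : z ∈ ys := pvChain_subset hz'
        have : y ≤ z := (List.pairwise_cons.mp htail).1 z hzys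
        exact lt_of_lt_of_le hpy this

theorem pvDedup_pairwise (xs : List Int) (h : xs.Pairwise (· ≤ ·)) :
    (pvDedup xs).Pairwise (· < ·) := by
  cases xs with
  | nil => simp [pvDedup]
  | cons x t => exact pvChain_pairwise x t h

/-- Adjacent dedup of `sorted post` is `sorted(set(post))`. -/
theorem pvDedup_sorted (post : List Int) :
    pvDedup (PySem.List.sorted post (fun x => x)) =
      PySem.List.sorted (PySem.Set.ofList post) (fun x => x) := by
  have hpw : (pvDedup (PySem.List.sorted post (fun x => x))).Pairwise (· < ·) :=
    pvDedup_pairwise _ (PySem.List.sorted_pairwise post (fun x => x))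
  have hnd : (pvDedup (PySem.List.sorted post (fun x => x))).Nodup :=
    hpw.imp (fun h => ne_of_lt h)
  have hperm : (pvDedup (PySem.List.sorted post (fun x => x))).Perm (PySem.Set.ofList post) := by
    refine (List.perm_ext_iff_of_nodup hnd (PySem.Set.nodup_ofList post)).mpr ?_
    intro a
    rw [pvDedup_mem_iff, PySem.List.mem_sorted, PySem.Set.mem_ofList]
  exact (PySem.List.sorted_eq_of_perm_of_pairwise_lt _ _ _ hperm hpw).symm

/-- The inner index loop, with the leading sentinel made explicit. -/
theorem pvChain_loop (d : Int) (xs : List Int) (p : Int) (acc : List Int) :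
    (List.range xs.length).foldl
      (fun a j =>
        if xs.getD j 0 ≠ (if j = 0 then p else xs.getD (j - 1) 0) then
          (a ++ [xs.getD j 0 + d]) ++ [xs.getD j 0 - d]
        else a) acc
    = acc ++ (pvChain p xs).flatMap (pvPair d) := by
  induction xs generalizing p acc with
  | nil => simp [pvChain]
  | cons y ys ih =>
    simp only [List.length_cons]
    rw [List.range_succ_eq_map]
    simp only [List.foldl_cons, List.foldl_map]
    have hbody :
        (fun (a : List Int) (j : Nat) =>
          if (y :: ys).getD (j + 1) 0 ≠ (if j + 1 = 0 then p else (y :: ys).getD (j + 1 - 1) 0) then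
            (a ++ [(y :: ys).getD (j + 1) 0 + d]) ++ [(y :: ys).getD (j + 1) 0 - d]
          else a)
        = (fun (a : List Int) (j : Nat) =>
          if ys.getD j 0 ≠ (if j = 0 then y else ys.getD (j - 1) 0) then
            (a ++ [ys.getD j 0 + d]) ++ [ys.getD j 0 - d]
          else a) := by
      funext a j
      cases j with
      | zero => simp
      | succ k => simp
    rw [hbody, ih]
    simp only [List.getD_cons_zero, pvChain]
    by_cases hyp : y = p
    · rw [if_neg (by simp [hyp]), if_pos hyp]
    · rw [if_pos (by simpa using hyp), if_neg hyp]
      simp [pvPair, List.append_assoc]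

/-- A's inner loop computes the expansion of the adjacent-deduped list. -/
theorem pvInner_eq (pre : List Int) (d : Int) :
    (PySem.List.pyRange 0 (PySem.List.len pre)).foldl
      (fun post2 j =>
        if j = 0 ∨ PySem.List.pyGetD pre j 0 ≠ PySem.List.pyGetD pre (j - 1) 0 then
          (post2 ++ [PySem.List.pyGetD pre j 0 + d]) ++ [PySem.List.pyGetD pre j 0 - d]
        else post2) []
    = (pvDedup pre).flatMap (pvPair d) := by
  have hlen : PySem.List.len pre = (pre.length : Int) := by simp [PySem.List.len]
  rw [hlen, PySem.List.pyRange_zero_natCast, List.foldl_map]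
  cases pre with
  | nil => simp [pvDedup]
  | cons x xs =>
    rw [List.length_cons, List.range_succ_eq_map]
    simp only [List.foldl_cons, List.foldl_map]
    have hbody :
        (fun (a : List Int) (j : Nat) =>
          if ((j + 1 : Nat) : Int) = 0 ∨
              PySem.List.pyGetD (x :: xs) ((j + 1 : Nat) : Int) 0 ≠
                PySem.List.pyGetD (x :: xs) (((j + 1 : Nat) : Int) - 1) 0 then
            (a ++ [PySem.List.pyGetD (x :: xs) ((j + 1 : Nat) : Int) 0 + d])
              ++ [PySem.List.pyGetD (x :: xs) ((j + 1 : Nat) : Int) 0 - d]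
          else a)
        = (fun (a : List Int) (j : Nat) =>
          if xs.getD j 0 ≠ (if j = 0 then x else xs.getD (j - 1) 0) then
            (a ++ [xs.getD j 0 + d]) ++ [xs.getD j 0 - d]
          else a) := by
      funext a j
      have h1 : ¬(((j + 1 : Nat) : Int) = 0) := by omega
      have h2 : (((j + 1 : Nat) : Int) - 1) = ((j : Nat) : Int) := by push_cast; ring
      rw [h2]
      simp only [PySem.List.pyGetD_natCast, h1, false_or]
      have h3 : (x :: xs).getD (j + 1) 0 = xs.getD j 0 := rfl
      rw [h3]
      cases j with
      | zero => simp
      | succ k => simp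
    rw [hbody, pvChain_loop]
    simp only [Nat.cast_zero, true_or, if_pos, pvDedup]
    rw [show PySem.List.pyGetD (x :: xs) (0 : Int) 0 = x from by
          simpa using PySem.List.pyGetD_natCast (x :: xs) 0 0]
    simp [pvPair]

/-- One ± expansion of a set of reachable values (ghost step, proof only). -/
def pvExpand (s : PySem.Set Int) (d : Int) : PySem.Set Int :=
  PySem.Set.ofList (s.flatMap (fun v => [v + d, v - d]))

/-- A's step on the accumulated list (the body of the outer loop, as a function of `l[i]`). -/
def pvStepA (post : List Int) (d : Int) : List Int :=
  if d ≠ 0 then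
    let pre := PySem.List.sorted post (fun x => x)
    (PySem.List.pyRange 0 (PySem.List.len pre)).foldl
      (fun post2 j =>
        if j = 0 ∨ PySem.List.pyGetD pre j 0 ≠ PySem.List.pyGetD pre (j - 1) 0 then
          (post2 ++ [PySem.List.pyGetD pre j 0 + d]) ++ [PySem.List.pyGetD pre j 0 - d]
        else post2) []
  else post

/-- Ghost step on a (reachable set, pending last move) pair (proof only). -/
def pvStepB (p : PySem.Set Int × Option Int) (d : Int) : PySem.Set Int × Option Int :=
  if d ≠ 0 then
    match p.2 with
    | some dl => (pvExpand p.1 dl, some d)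
    | none => (p.1, some d)
  else p

/-- The coupling invariant between A's list and the ghost (set, last) state. -/
def pvRel (x0 : Int) (post : List Int) (p : PySem.Set Int × Option Int) : Prop :=
  p.1.Nodup ∧
    ((p.2 = none ∧ post = [x0] ∧ p.1 = [x0]) ∨
      (∃ d, p.2 = some d ∧ post = (PySem.List.sorted p.1 (fun x => x)).flatMap (pvPair d)))

theorem pvStepA_ne (post : List Int) {d : Int} (hd : d ≠ 0) :
    pvStepA post d =
      (PySem.List.sorted (PySem.Set.ofList post) (fun x => x)).flatMap (pvPair d) := by
  rw [pvStepA, if_pos hd, ← pvDedup_sorted, pvInner_eq]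

theorem pvRel_step (x0 : Int) (post : List Int) (p : PySem.Set Int × Option Int) (d : Int)
    (h : pvRel x0 post p) : pvRel x0 (pvStepA post d) (pvStepB p d) := by
  rcases h with ⟨hnd, hcase⟩
  by_cases hd : d = 0
  · subst hd
    have hne : ¬((0 : Int) ≠ 0) := by omega
    simp only [pvStepA, pvStepB, if_neg hne]
    exact ⟨hnd, hcase⟩
  · rcases hcase with ⟨h2, hpost, hs⟩ | ⟨dl, h2, hpost⟩
    · refine ⟨?_, Or.inr ⟨d, ?_, ?_⟩⟩
      · simp [pvStepB, if_pos hd, h2, hnd]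
      · simp [pvStepB, if_pos hd, h2]
      · rw [pvStepA_ne post hd, hpost]
        have hof : PySem.Set.ofList [x0] = [x0] := by
          simp [PySem.Set.ofList, PySem.Set.add]
        rw [hof]
        simp [pvStepB, if_pos hd, h2, hs]
    · have hsort :
          PySem.List.sorted (PySem.Set.ofList post) (fun x => x) =
            PySem.List.sorted (pvExpand p.1 dl) (fun x => x) := by
        apply PySem.List.sorted_eq_sorted_of_perm
        · exact fun a b hab => hab
        · refine (List.perm_ext_iff_of_nodup (PySem.Set.nodup_ofList _)
            (PySem.Set.nodup_ofList _)).mpr ?_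
          intro a
          simp only [PySem.Set.mem_ofList, hpost]
          simp only [List.mem_flatMap, PySem.List.mem_sorted, pvPair]
      refine ⟨?_, Or.inr ⟨d, ?_, ?_⟩⟩
      · simp [pvStepB, if_pos hd, h2, pvExpand, PySem.Set.nodup_ofList]
      · simp [pvStepB, if_pos hd, h2]
      · rw [pvStepA_ne post hd, hsort]
        simp [pvStepB, if_pos hd, h2]

theorem pvRel_fold (x0 : Int) (ds : List Int) (post : List Int)
    (p : PySem.Set Int × Option Int) (h : pvRel x0 post p) :
    pvRel x0 (ds.foldl pvStepA post) (ds.foldl pvStepB p) := by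
  induction ds generalizing post p with
  | nil => exact h
  | cons d t ih => exact ih _ _ (pvRel_step x0 post p d h)

theorem pvMap_pyRange_tail (x : Int) (rest : List Int) :
    (PySem.List.pyRange 1 (PySem.List.len (x :: rest))).map
        (fun i => PySem.List.pyGetD (x :: rest) i 0) = rest := by
  have h := PySem.List.map_pyGetD_pyRange_zero (x :: rest) 0
  have hlen : (0 : Int) < PySem.List.len (x :: rest) := by
    simp only [PySem.List.len, List.length_cons]
    omega
  rw [PySem.List.pyRange_one_cons hlen] at h
  simp only [List.map_cons] at h
  have h0 : PySem.List.pyGetD (x :: rest) 0 0 = x := by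
    simpa using PySem.List.pyGetD_natCast (x :: rest) 0 0
  rw [h0] at h
  rw [zero_add] at h
  exact (List.cons.inj h).2

/-- The ghost fold with a pending move: expand by everything but the last nonzero move. -/
theorem pvGhost_some (rest : List Int) (S : PySem.Set Int) (dl : Int) :
    rest.foldl pvStepB (S, some dl) =
      ((dl :: rest.filter (fun d => decide (d ≠ 0))).dropLast.foldl pvExpand S,
        some (pvLast (dl :: rest.filter (fun d => decide (d ≠ 0))))) := by
  induction rest generalizing S dl with
  | nil => simp [pvLast]
  | cons d t ih =>
    by_cases hd : d = 0
    · subst hd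
      have hne : ¬((0 : Int) ≠ 0) := by omega
      simp only [List.foldl_cons, pvStepB, if_neg hne, List.filter_cons]
      simp [ih]
    · have hfil : (d :: t).filter (fun x => decide (x ≠ 0))
          = d :: t.filter (fun x => decide (x ≠ 0)) := by simp [hd]
      simp only [List.foldl_cons, pvStepB, if_pos hd]
      rw [hfil, ih (pvExpand S dl) d]
      simp only [Prod.mk.injEq]
      refine ⟨?_, rfl⟩
      rw [List.dropLast_cons₂, List.foldl_cons]

/-- The ghost fold from the initial state, in terms of the nonzero moves. -/
theorem pvGhost_none (rest : List Int) (S : PySem.Set Int) :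
    rest.foldl pvStepB (S, none) =
      (if _ : rest.filter (fun d => decide (d ≠ 0)) = [] then (S, none)
       else ((rest.filter (fun d => decide (d ≠ 0))).dropLast.foldl pvExpand S,
         some (pvLast (rest.filter (fun d => decide (d ≠ 0)))))) := by
  induction rest generalizing S with
  | nil => simp
  | cons d t ih =>
    by_cases hd : d = 0
    · subst hd
      have hne : ¬((0 : Int) ≠ 0) := by omega
      simp only [List.foldl_cons, pvStepB, if_neg hne, List.filter_cons]
      simp [ih]
    · simp only [List.foldl_cons, pvStepB, if_pos hd, List.filter_cons]
      rw [pvGhost_some t S d]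
      simp [hd]

/-- B's sums step (the body of B's DP loop). -/
def pvSumStep (s : PySem.Set Int) (d : Int) : PySem.Set Int :=
  PySem.Set.union s (PySem.Set.ofList (s.map (fun t => t + 2 * d)))

theorem pvExpand_fold_nodup (ds : List Int) (S : PySem.Set Int) (h : S.Nodup) :
    (ds.foldl pvExpand S).Nodup := by
  induction ds generalizing S with
  | nil => exact h
  | cons d t ih => exact ih _ (PySem.Set.nodup_ofList _)

theorem pvSumStep_nodup (ds : List Int) (S : PySem.Set Int) (h : S.Nodup) :
    (ds.foldl pvSumStep S).Nodup := by
  induction ds generalizing S with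
  | nil => exact h
  | cons d t ih => exact ih _ (PySem.Set.nodup_union _ _ h)

/-- The correspondence: `v` reachable from `S` via `ds` iff `C + sum ds - v` is a
    doubled subset sum accumulated from `T`, given the same relation between `S` and `T`. -/
theorem pvSum_corr (ds : List Int) (S T : PySem.Set Int) (C : Int)
    (h : ∀ v, v ∈ S ↔ (C - v) ∈ T) :
    ∀ v, v ∈ ds.foldl pvExpand S ↔ (C + ds.sum - v) ∈ ds.foldl pvSumStep T := by
  induction ds generalizing S T C with
  | nil => simpa using h
  | cons d t ih =>
    have hstep : ∀ v, v ∈ pvExpand S d ↔ ((C + d) - v) ∈ pvSumStep T d := by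
      intro v
      simp only [pvExpand, pvSumStep, PySem.Set.mem_ofList, PySem.Set.mem_union,
        List.mem_flatMap, List.mem_map, List.mem_cons, List.not_mem_nil, or_false]
      constructor
      · rintro ⟨w, hw, hv | hv⟩
        · exact Or.inl (by subst hv; have := (h w).mp hw; simpa [show C + d - (w + d) = C - w by ring] using this)
        · refine Or.inr ⟨C - w, (h w).mp hw, by subst hv; ring⟩
      · rintro (ht | ⟨s, hs, hsv⟩)
        · refine ⟨C - (C + d - v), ?_, Or.inl (by ring)⟩
          rw [h]
          simpa [show C - (C - (C + d - v)) = C + d - v by ring] using ht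
        · refine ⟨C - s, ?_, Or.inr (by omega)⟩
          rw [h]
          simpa [show C - (C - s) = s by ring] using hs
    intro v
    simp only [List.foldl_cons, List.sum_cons]
    rw [show C + (d + t.sum) - v = (C + d) + t.sum - v by ring]
    exact ih (pvExpand S d) (pvSumStep T d) (C + d) hstep v

/-- B's emission list: mapping `base - ·` over the descending sums is the ascending reachable list. -/
theorem pvEmit_eq (init : List Int) (x0 : Int) :
    (PySem.List.sorted (init.foldl pvSumStep (PySem.Set.ofList [(0 : Int)])) (fun x => x) true).map
        (fun s => x0 + init.sum - s)
      = PySem.List.sorted (init.foldl pvExpand (PySem.Set.ofList [x0])) (fun x => x) := by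
  set T := init.foldl pvSumStep (PySem.Set.ofList [(0 : Int)]) with hT
  set S := init.foldl pvExpand (PySem.Set.ofList [x0]) with hS
  have hTnd : T.Nodup := pvSumStep_nodup _ _ (PySem.Set.nodup_ofList _)
  have hSnd : S.Nodup := pvExpand_fold_nodup _ _ (PySem.Set.nodup_ofList _)
  have hcorr : ∀ v, v ∈ S ↔ (x0 + init.sum - v) ∈ T := by
    intro v
    refine pvSum_corr init _ _ x0 ?_ v
    intro w
    simp only [PySem.Set.mem_ofList, List.mem_cons, List.not_mem_nil, or_false]
    omega
  have hsortnd : (PySem.List.sorted T (fun x => x) true).Nodup :=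
    (PySem.List.sorted_perm T (fun x => x) true).nodup_iff.mpr hTnd
  have hpwrev : (PySem.List.sorted T (fun x => x) true).Pairwise (fun a b => b ≤ a) :=
    PySem.List.sorted_pairwise_rev T (fun x => x)
  have hpwlt : ((PySem.List.sorted T (fun x => x) true).map (fun s => x0 + init.sum - s)).Pairwise
      (· < ·) := by
    rw [List.pairwise_map]
    have := hpwrev.and hsortnd
    exact this.imp (by intro a b hab; omega)
  have hperm : ((PySem.List.sorted T (fun x => x) true).map (fun s => x0 + init.sum - s)).Perm S := by
    refine (List.perm_ext_iff_of_nodup (hpwlt.imp (fun h => ne_of_lt h)) hSnd).mpr ?_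
    intro v
    simp only [List.mem_map, PySem.List.mem_sorted]
    rw [hcorr v]
    constructor
    · rintro ⟨s, hs, rfl⟩
      simpa [show x0 + init.sum - (x0 + init.sum - s) = s by ring] using hs
    · intro hv
      exact ⟨x0 + init.sum - v, hv, by ring⟩
  exact (PySem.List.sorted_eq_of_perm_of_pairwise_lt _ _ _ hperm hpwlt).symm

/-- Unrolling B's emission loop. -/
theorem pvFold_pairs (L : List Int) (base last : Int) (acc : List Int) :
    L.foldl (fun out s => (out ++ [base - s + last]) ++ [base - s - last]) acc
      = acc ++ (L.map (fun s => base - s)).flatMap (pvPair last) := by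
  induction L generalizing acc with
  | nil => simp
  | cons s t ih =>
    simp only [List.foldl_cons, List.map_cons, List.flatMap_cons]
    rw [ih]
    simp [pvPair, List.append_assoc]

/-- B's result when at least one nonzero move exists. -/
theorem pvB_char (x : Int) (rest : List Int)
    (hm : ¬ rest.filter (fun d => decide (d ≠ 0)) = []) :
    f_alt (x :: rest) =
      (PySem.List.sorted ((rest.filter (fun d => decide (d ≠ 0))).dropLast.foldl pvExpand [x])
          (fun x => x) false).flatMap
        (pvPair (pvLast (rest.filter (fun d => decide (d ≠ 0))))) := by
  have hx0 : PySem.List.pyGetD (x :: rest) 0 0 = x := by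
    simpa using PySem.List.pyGetD_natCast (x :: rest) 0 0
  have hlenne : ¬(PySem.List.len (x :: rest) == 0) = true := by
    simp only [PySem.List.len, List.length_cons, beq_iff_eq]
    push_cast
    omega
  have hslice : PySem.List.slice (x :: rest) (some 1) none = rest := by
    rw [PySem.List.slice_from (x :: rest) (by norm_num : (0:Int) ≤ 1)]
    rfl
  have hof : PySem.Set.ofList [x] = [x] := by
    simp [PySem.Set.ofList, PySem.Set.add]
  rw [f_alt, if_neg hlenne]
  simp only [hx0, hslice]
  rw [if_neg hm]
  rw [show (fun (s : PySem.Set Int) (d : Int) =>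
        PySem.Set.union s (PySem.Set.ofList (s.map (fun t => t + 2 * d)))) = pvSumStep from rfl]
  rw [pvFold_pairs, pvEmit_eq, hof]
  simp

-- ===== VERDICT (by name: the statement is the Claim_ definition above) =====
theorem f_spec : Claim_equal_f := by
  intro l _
  unfold Spec_f
  cases l with
  | nil => rfl
  | cons x rest =>
    have hx0 : PySem.List.pyGetD (x :: rest) 0 0 = x := by
      simpa using PySem.List.pyGetD_natCast (x :: rest) 0 0
    have hlenne : ¬(PySem.List.len (x :: rest) == 0) = true := by
      simp only [PySem.List.len, List.length_cons, beq_iff_eq]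
      push_cast
      omega
    have hslice : PySem.List.slice (x :: rest) (some 1) none = rest := by
      rw [PySem.List.slice_from (x :: rest) (by norm_num : (0:Int) ≤ 1)]
      rfl
    have hfold :
        (PySem.List.pyRange 1 (PySem.List.len (x :: rest))).foldl
            (fun post i => pvStepA post (PySem.List.pyGetD (x :: rest) i 0)) [x]
          = rest.foldl pvStepA [x] := by
      conv_rhs => rw [← pvMap_pyRange_tail x rest]
      rw [List.foldl_map]
    have hA : f (x :: rest) = rest.foldl pvStepA [x] := by
      rw [f, if_neg hlenne, hx0, ← hfold]
      rfl
    have hrel : pvRel x (rest.foldl pvStepA [x]) (rest.foldl pvStepB ([x], none)) :=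
      pvRel_fold x rest [x] ([x], none)
        ⟨by simp, Or.inl ⟨rfl, rfl, rfl⟩⟩
    rw [hA]
    rw [pvGhost_none rest [x]] at hrel
    by_cases hm : rest.filter (fun d => decide (d ≠ 0)) = []
    · rw [dif_pos hm] at hrel
      rcases hrel with ⟨_, ⟨_, hpost, _⟩ | ⟨d, h2, _⟩⟩
      · rw [hpost, f_alt, if_neg hlenne, hx0, hslice, if_pos hm]
      · exact absurd h2 (by simp)
    · rw [dif_neg hm] at hrel
      rcases hrel with ⟨_, ⟨h2, _, _⟩ | ⟨d, h2, hpost⟩⟩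
      · exact absurd h2 (by simp)
      · have hd : d = pvLast (rest.filter (fun d => decide (d ≠ 0))) := by
          simpa using (Option.some.inj h2).symm
        rw [hpost, pvB_char x rest hm, hd]
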